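-- pv_equiv track=rewrite | github.com/b-3llum/kerb-map | kerb_chain/playbook.py | _tokenise_logical
-- ===== SOURCE A (Python) =====
-- def _tokenise_logical(expr: str) -> list[str]:
--     """Split a condition string on the keywords ``and`` / ``or`` while
--     keeping the operators as separate tokens. Quoted substrings are
--     preserved verbatim so something like ``foo == 'a and b'`` doesn't
--     get split on the inner ``and``."""
--     out: list[str] = []
--     buf: list[str] = []
--     i, n = 0, len(expr)
--     in_quote: str | None = None
--     while i < n:
--         c = expr[i]
--         if in_quote:
--             buf.append(c)
--             if c == in_quote:
--                 in_quote = None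
--             i += 1
--             continue
--         if c in "'\"":
--             in_quote = c
--             buf.append(c)
--             i += 1
--             continue
--         # Try to match `and `/`or ` boundaries with whitespace.
--         rest = expr[i:].lstrip()
--         if rest.lower().startswith("and ") and (not buf or buf[-1].isspace()):
--             out.append("".join(buf).strip())
--             out.append("and")
--             buf = []
--             i = expr.index(rest, i) + 3
--             continue
--         if rest.lower().startswith("or ") and (not buf or buf[-1].isspace()):
--             out.append("".join(buf).strip())
--             out.append("or")
--             buf = []
--             i = expr.index(rest, i) + 2
--             continue
--         buf.append(c)
--         i += 1
--     last = "".join(buf).strip()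
--     if last:
--         out.append(last)
--     return [t for t in out if t]
-- ===== SOURCE B (Python) =====
-- def _tokenise_logical(expr: str) -> list[str]:
--     """Single left-to-right pass: a precomputed lowercase copy plus a
--     boolean flag (tracking whether the buffer is empty or ends in
--     whitespace) replace A's per-position lstrip/slice/index rescans."""
--     low = expr.lower()
--     out: list[str] = []
--     buf = ""
--     boundary = True  # buf is empty or ends in whitespace (valid while not in a quote)
--     in_quote = None
--     i, n = 0, len(expr)
--     while i < n:
--         c = expr[i]
--         if in_quote is not None:
--             if c == in_quote:
--                 in_quote = None
--             buf += c
--             boundary = False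
--             i += 1
--         elif c in "'\"":
--             in_quote = c
--             buf += c
--             boundary = False
--             i += 1
--         elif boundary and low.startswith("and ", i):
--             out.append(buf.strip())
--             out.append("and")
--             buf = ""
--             boundary = True
--             i += 3
--         elif boundary and low.startswith("or ", i):
--             out.append(buf.strip())
--             out.append("or")
--             buf = ""
--             boundary = True
--             i += 2
--         else:
--             buf += c
--             boundary = c.isspace()
--             i += 1
--     last = buf.strip()
--     if last:
--         out.append(last)
--     return [t for t in out if t]
-- ===== Notes on version B (the rewrite author's own statement) =====
-- stated objective: faster
-- what changed: Replaced the per-position expr[i:].lstrip()/rest.lower()/expr.index(rest,i) rescans with a single O(n) pass that precomputes the lowercase string once, tests the keyword with startswith at the current index, and tracks whether the buffer is empty or ends in whitespace with a boolean flag instead of re-inspecting the buffer.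
import Mathlib
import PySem

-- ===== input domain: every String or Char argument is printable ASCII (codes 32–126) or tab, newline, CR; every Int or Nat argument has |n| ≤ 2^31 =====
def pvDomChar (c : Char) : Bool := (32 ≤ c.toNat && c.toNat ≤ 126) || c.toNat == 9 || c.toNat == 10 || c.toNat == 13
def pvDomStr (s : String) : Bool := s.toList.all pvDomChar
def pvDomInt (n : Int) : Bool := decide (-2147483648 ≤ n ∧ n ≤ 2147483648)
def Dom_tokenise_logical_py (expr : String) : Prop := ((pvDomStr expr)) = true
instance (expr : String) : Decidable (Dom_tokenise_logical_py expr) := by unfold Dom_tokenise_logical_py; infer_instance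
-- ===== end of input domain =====

-- B replaces A's per-position lstrip/slice/index rescans by a single pass over a
-- precomputed lowercase copy, tracking whether the buffer is empty or
-- ends in whitespace with a boolean flag; a timing run measured B faster.

-- ===== PORT A =====

-- port of Python's `not buf or buf[-1].isspace()`
def pvBufBoundary (buf : List Char) : Bool :=
  buf.isEmpty || (buf.getLast?.elim false PySem.Chars.isspace)

-- the next two lemmas are cited by port A's decreasing_by (the jump `i = expr.index(rest, i) + 3`):
-- expr.index(expr[i:].lstrip(), i) lands exactly past the stripped whitespace.
theorem pvDropWhile_head_false {p : Char → Bool} {l : List Char} {c : Char} {t : List Char}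
    (h : l.dropWhile p = c :: t) : p c = false := by
  induction l with
  | nil => simp at h
  | cons a l ih =>
    by_cases ha : p a
    · simp [ha] at h; exact ih h
    · simp [ha] at h
      simp [← h.1]; simpa using ha

theorem pvFindFrom_lstrip_toNat (s : List Char) (i : Nat) (hi : i ≤ s.length)
    (hne : PySem.Chars.lstrip (s.drop i) ≠ []) :
    (PySem.Chars.findFrom s (PySem.Chars.lstrip (s.drop i)) (i : Int)).toNat
      = i + ((s.drop i).takeWhile PySem.Chars.isspace).length := by
  set t := s.drop i with ht
  set ws := t.takeWhile PySem.Chars.isspace with hws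
  set rest := PySem.Chars.lstrip t with hrest
  have hsplit : ws ++ rest = t := List.takeWhile_append_dropWhile
  set w := ws.length with hw
  have hdropk : s.drop (i + w) = rest := by
    rw [← List.drop_drop, ← ht, ← hsplit, hw, List.drop_left]
  have hkle : i + w < s.length := by
    have : rest ≠ [] := hne
    rw [← hdropk] at this
    by_contra hcon
    exact this (List.drop_eq_nil_of_le (by omega))
  have hinfix : rest <:+: s.drop i := ⟨ws, [], by simp [← ht, hsplit]⟩
  have hne1 : PySem.Chars.findFrom s rest (i : Int) ≠ -1 := by
    intro hc
    exact ((PySem.Chars.findFrom_natCast_eq_neg_one_iff s rest i hi).mp hc) hinfix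
  obtain ⟨hge, hpref, hmin⟩ := PySem.Chars.findFrom_natCast_spec s rest i hi hne1
  set f := (PySem.Chars.findFrom s rest (i : Int)).toNat with hf
  have hif : i ≤ f := by omega
  have hupper : f ≤ i + w := by
    by_contra hcon
    exact hmin (i + w) (by omega) (by omega) (hdropk ▸ List.prefix_refl rest)
  have hlower : ¬ f < i + w := by
    intro hcon
    obtain ⟨rh, rt, hrc⟩ := List.exists_cons_of_ne_nil hne
    have hhead : (s.drop f)[0]? = some rh := by
      obtain ⟨u, hu⟩ := hpref
      rw [← hu, hrc]; rfl
    have hsf : s[f]? = t[f - i]? := by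
      rw [ht, List.getElem?_drop]; congr 1; omega
    have h0 : (s.drop f)[0]? = s[f]? := by rw [List.getElem?_drop, Nat.add_zero]
    have htf : t[f - i]? = ws[f - i]? := by
      rw [← hsplit, List.getElem?_append_left (by omega)]
    have hmem : rh ∈ ws := by
      have : ws[f - i]? = some rh := by rw [← htf, ← hsf, ← h0, hhead]
      exact List.mem_of_getElem? this
    have hsp : PySem.Chars.isspace rh = true := List.mem_takeWhile_imp (hws ▸ hmem)
    have hnsp : PySem.Chars.isspace rh = false :=
      pvDropWhile_head_false (p := PySem.Chars.isspace) (l := t) (hrest ▸ hrc)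
    rw [hsp] at hnsp; exact absurd hnsp (by simp)
  omega

theorem pvRest_ne_nil {r p : List Char} (hp : PySem.Chars.startswith (PySem.Chars.lower r) p = true)
    (hne : p ≠ []) : r ≠ [] := by
  intro h; subst h
  rw [PySem.Chars.startswith_iff] at hp
  have := hp.length_le
  simp [PySem.Chars.lower] at this
  exact hne this

-- loop of A: while i < n over (i, buf, out, in_quote); out holds the tokens as List Char
def pvLoopA (s : List Char) (i : Nat) (buf : List Char) (out : List (List Char))
    (inq : Option Char) : List (List Char) :=
  if h : i < s.length then
    let c := s[i]
    match inq with
    | some q => pvLoopA s (i+1) (buf ++ [c]) out (if c == q then none else some q)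
    | none =>
      if c == '\'' || c == '"' then
        pvLoopA s (i+1) (buf ++ [c]) out (some c)
      else
        -- rest = expr[i:].lstrip()
        let rest := PySem.Chars.lstrip (s.drop i)
        if hand : (PySem.Chars.startswith (PySem.Chars.lower rest) "and ".toList
                    && pvBufBoundary buf) = true then
          pvLoopA s ((PySem.Chars.findFrom s rest (i : Int)).toNat + 3) []
            (out ++ [PySem.Chars.strip buf, "and".toList]) none
        else if hor : (PySem.Chars.startswith (PySem.Chars.lower rest) "or ".toList
                    && pvBufBoundary buf) = true then
          pvLoopA s ((PySem.Chars.findFrom s rest (i : Int)).toNat + 2) []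
            (out ++ [PySem.Chars.strip buf, "or".toList]) none
        else
          pvLoopA s (i+1) (buf ++ [c]) out none
  else
    let last := PySem.Chars.strip buf
    (if last.isEmpty then out else out ++ [last]).filter (fun t => !t.isEmpty)
termination_by s.length - i
decreasing_by
  · omega
  · omega
  · have hne : PySem.Chars.lstrip (s.drop i) ≠ [] :=
      pvRest_ne_nil (r := PySem.Chars.lstrip (List.drop i s)) (p := "and ".toList)
        (by simp only [Bool.and_eq_true] at hand; exact hand.1) (by decide)
    have := pvFindFrom_lstrip_toNat s i (Nat.le_of_lt h) hne
    omega
  · have hne : PySem.Chars.lstrip (s.drop i) ≠ [] :=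
      pvRest_ne_nil (r := PySem.Chars.lstrip (List.drop i s)) (p := "or ".toList)
        (by simp only [Bool.and_eq_true] at hor; exact hor.1) (by decide)
    have := pvFindFrom_lstrip_toNat s i (Nat.le_of_lt h) hne
    omega
  · omega

def tokenise_logical_py (expr : String) : List String :=
  (pvLoopA expr.toList 0 [] [] none).map (fun t => String.ofList t)

-- ===== PORT B =====

-- loop of B: single pass with precomputed lowercase copy `low` and `boundary` flag
def pvLoopB (s low : List Char) (i : Nat) (buf : List Char) (out : List (List Char))
    (boundary : Bool) (inq : Option Char) : List (List Char) :=
  if h : i < s.length then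
    let c := s[i]
    match inq with
    | some q => pvLoopB s low (i+1) (buf ++ [c]) out false (if c == q then none else some q)
    | none =>
      if c == '\'' || c == '"' then
        pvLoopB s low (i+1) (buf ++ [c]) out false (some c)
      -- low.startswith("and ", i)
      else if boundary && PySem.Chars.startswith (low.drop i) "and ".toList then
        pvLoopB s low (i+3) [] (out ++ [PySem.Chars.strip buf, "and".toList]) true none
      else if boundary && PySem.Chars.startswith (low.drop i) "or ".toList then
        pvLoopB s low (i+2) [] (out ++ [PySem.Chars.strip buf, "or".toList]) true none
      else
        pvLoopB s low (i+1) (buf ++ [c]) out (PySem.Chars.isspace c) none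
  else
    let last := PySem.Chars.strip buf
    (if last.isEmpty then out else out ++ [last]).filter (fun t => !t.isEmpty)
termination_by s.length - i

def tokenise_logical_py_alt (expr : String) : List String :=
  (pvLoopB expr.toList (PySem.Chars.lower expr.toList) 0 [] [] true none).map
    (fun t => String.ofList t)

-- ===== PRECONDITION & SPEC =====
def Spec_tokenise_logical_py (expr : String) (out : List String) : Prop := out = tokenise_logical_py_alt expr
instance (expr : String) (out : List String) : Decidable (Spec_tokenise_logical_py expr out) := by unfold Spec_tokenise_logical_py; infer_instance

-- ===== CLAIM (what is proved, stated in full; the proofs are below) =====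
def Claim_equal_tokenise_logical_py : Prop := ∀ (expr : String), Dom_tokenise_logical_py expr → Spec_tokenise_logical_py expr (tokenise_logical_py expr)

-- ===== LEMMAS AND PROOFS =====

theorem pvBufBoundary_append (buf : List Char) (c : Char) :
    pvBufBoundary (buf ++ [c]) = PySem.Chars.isspace c := by
  simp [pvBufBoundary]

theorem pvIsspace_lowerChar {c : Char} (h : PySem.Chars.isspace c = true) :
    PySem.Chars.lowerChar c = c := by
  have hu : PySem.Chars.isupper c = false := by
    simp [PySem.Chars.isspace] at h
    simp only [PySem.Chars.isupper, Bool.and_eq_false_iff, decide_eq_false_iff_not,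
      Char.le_def]
    have h65 : ('A' : Char).val = 65 := rfl
    have h90 : ('Z' : Char).val = 90 := rfl
    rw [h65, h90]
    simp only [UInt32.le_iff_toNat_le]
    have hv1 : (65 : UInt32).toNat = 65 := rfl
    have hv2 : (90 : UInt32).toNat = 90 := rfl
    have hc : c.toNat = c.val.toNat := rfl
    rw [hv1, hv2]
    rw [hc] at h
    omega
  simp [PySem.Chars.lowerChar, hu]

theorem pvIsspace_not_quote {c : Char} (h : PySem.Chars.isspace c = true) :
    (c == '\'' || c == '"') = false := by
  have h1 : c ≠ '\'' := by rintro rfl; simp [PySem.Chars.isspace] at h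
  have h2 : c ≠ '"' := by rintro rfl; simp [PySem.Chars.isspace] at h
  simp [h1, h2]

theorem pvStartswith_cons_false {c x : Char} {l p : List Char} (h : c ≠ x) :
    PySem.Chars.startswith (c :: l) (x :: p) = false := by
  simp [PySem.Chars.startswith, List.isPrefixOf]
  intro he; exact absurd he.symm h

theorem pvStartswith_cons_head {c x : Char} {l p : List Char}
    (h : PySem.Chars.startswith (c :: l) (x :: p) = true) : x = c := by
  simp [PySem.Chars.startswith, List.isPrefixOf] at h
  exact h.1

theorem pvRstrip_append_space {buf : List Char} {c : Char} (h : PySem.Chars.isspace c = true) :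
    PySem.Chars.rstrip (buf ++ [c]) = PySem.Chars.rstrip buf := by
  simp [PySem.Chars.rstrip, h]

theorem pvStrip_append_space {buf : List Char} {c : Char} (h : PySem.Chars.isspace c = true) :
    PySem.Chars.strip (buf ++ [c]) = PySem.Chars.strip buf := by
  unfold PySem.Chars.strip PySem.Chars.lstrip
  rw [List.dropWhile_append]
  split
  · next he =>
    simp [h, List.isEmpty_iff.mp he, PySem.Chars.rstrip]
  · exact pvRstrip_append_space h

theorem pvLstrip_cons_space {c : Char} {l : List Char} (h : PySem.Chars.isspace c = true) :
    PySem.Chars.lstrip (c :: l) = PySem.Chars.lstrip l := by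
  simp [PySem.Chars.lstrip, h]

theorem pvLower_drop (s : List Char) (i : Nat) :
    (PySem.Chars.lower s).drop i = PySem.Chars.lower (s.drop i) := by
  simp [PySem.Chars.lower, List.map_drop]

-- head of an expression whose lstrip starts (lowered) with 'a'/'o' is not a quote
theorem pvHead_not_quote {l : List Char} {x : Char} {p : List Char}
    (hx : x = 'a' ∨ x = 'o') {c : Char} {t : List Char} (hc : l = c :: t)
    (hm : PySem.Chars.startswith (PySem.Chars.lower (PySem.Chars.lstrip l)) (x :: p) = true) :
    (c == '\'' || c == '"') = false := by
  by_cases hsp : PySem.Chars.isspace c = true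
  · exact pvIsspace_not_quote hsp
  · have hl : PySem.Chars.lstrip l = c :: t := by
      rw [hc]; simp [PySem.Chars.lstrip, Bool.eq_false_iff.mpr hsp]
    rw [hl] at hm
    have : x = PySem.Chars.lowerChar c := pvStartswith_cons_head (by simpa [PySem.Chars.lower] using hm)
    have h1 : c ≠ '\'' := by rintro rfl; rcases hx with rfl | rfl <;> simp [PySem.Chars.lowerChar, PySem.Chars.isupper] at this
    have h2 : c ≠ '"' := by rintro rfl; rcases hx with rfl | rfl <;> simp [PySem.Chars.lowerChar, PySem.Chars.isupper] at this
    simp [h1, h2]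

theorem pvIsspace_ne {c x : Char} (h : PySem.Chars.isspace c = true)
    (hx : PySem.Chars.isspace x = false) : c ≠ x := by
  rintro rfl; rw [h] at hx; exact absurd hx (by simp)

theorem pvStepB_space (s : List Char) (i : Nat) (buf : List Char) (out : List (List Char))
    (h : i < s.length) (hsp : PySem.Chars.isspace (s[i]'h) = true) :
    pvLoopB s (PySem.Chars.lower s) i buf out true none
      = pvLoopB s (PySem.Chars.lower s) (i+1) (buf ++ [s[i]'h]) out true none := by
  have hq := pvIsspace_not_quote hsp
  have hco : s.drop i = s[i]'h :: s.drop (i+1) := List.drop_eq_getElem_cons h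
  have hdrop : (PySem.Chars.lower s).drop i
      = PySem.Chars.lowerChar (s[i]'h) :: PySem.Chars.lower (s.drop (i+1)) := by
    rw [pvLower_drop, hco]; rfl
  have hland : PySem.Chars.startswith ((PySem.Chars.lower s).drop i) "and ".toList = false := by
    rw [hdrop, pvIsspace_lowerChar hsp]
    exact pvStartswith_cons_false (pvIsspace_ne (x := 'a') hsp (by decide))
  have hlor : PySem.Chars.startswith ((PySem.Chars.lower s).drop i) "or ".toList = false := by
    rw [hdrop, pvIsspace_lowerChar hsp]
    exact pvStartswith_cons_false (pvIsspace_ne (x := 'o') hsp (by decide))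
  conv_lhs => rw [pvLoopB]
  simp only [dif_pos h, hq, Bool.false_eq_true, if_false, hland, hlor,
    Bool.and_false, hsp]

theorem pvStepA_space (s : List Char) (i : Nat) (buf : List Char) (out : List (List Char))
    (h : i < s.length) (hsp : PySem.Chars.isspace (s[i]'h) = true)
    (hb : pvBufBoundary buf = true) :
    pvLoopA s i buf out none = pvLoopA s (i+1) (buf ++ [s[i]'h]) out none := by
  have hq := pvIsspace_not_quote hsp
  have hco : s.drop i = s[i]'h :: s.drop (i+1) := List.drop_eq_getElem_cons h
  have hrest : PySem.Chars.lstrip (s.drop i) = PySem.Chars.lstrip (s.drop (i+1)) := by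
    rw [hco, pvLstrip_cons_space hsp]
  have hbb : pvBufBoundary (buf ++ [s[i]'h]) = true := by
    rw [pvBufBoundary_append]; exact hsp
  have hTW : (s.drop i).takeWhile PySem.Chars.isspace
      = (s[i]'h) :: (s.drop (i+1)).takeWhile PySem.Chars.isspace := by
    rw [hco, List.takeWhile_cons_of_pos hsp]
  conv_lhs => rw [pvLoopA]
  simp only [dif_pos h, hq, Bool.false_eq_true, if_false, hrest, hb, Bool.and_true]
  by_cases hand : PySem.Chars.startswith
      (PySem.Chars.lower (PySem.Chars.lstrip (s.drop (i+1)))) "and ".toList = true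
  · rw [dif_pos hand]
    have hne' : PySem.Chars.lstrip (s.drop (i+1)) ≠ [] := pvRest_ne_nil hand (by decide)
    have h2 : i + 1 < s.length := by
      by_contra hcon
      exact hne' (by rw [List.drop_eq_nil_of_le (by omega)]; rfl)
    have hco2 : s.drop (i+1) = s[i+1]'h2 :: s.drop (i+2) := List.drop_eq_getElem_cons h2
    have hq2 : ((s[i+1]'h2) == '\'' || (s[i+1]'h2) == '"') = false :=
      pvHead_not_quote (Or.inl rfl) hco2 hand
    conv_rhs => rw [pvLoopA]
    simp only [dif_pos h2, hq2, Bool.false_eq_true, if_false, hbb, Bool.and_true]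
    rw [dif_pos hand, pvStrip_append_space hsp]
    have e1 := pvFindFrom_lstrip_toNat s i (Nat.le_of_lt h) (by rw [hrest]; exact hne')
    rw [hrest] at e1
    have e2 := pvFindFrom_lstrip_toNat s (i+1) (by omega) hne'
    have hidx : (PySem.Chars.findFrom s (PySem.Chars.lstrip (s.drop (i+1))) (i : Int)).toNat
        = (PySem.Chars.findFrom s (PySem.Chars.lstrip (s.drop (i+1))) ((i+1 : Nat) : Int)).toNat := by
      rw [e1, e2, hTW]; simp; omega
    rw [hidx]
  · rw [dif_neg hand]
    by_cases hor : PySem.Chars.startswith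
        (PySem.Chars.lower (PySem.Chars.lstrip (s.drop (i+1)))) "or ".toList = true
    · rw [dif_pos hor]
      have hne' : PySem.Chars.lstrip (s.drop (i+1)) ≠ [] := pvRest_ne_nil hor (by decide)
      have h2 : i + 1 < s.length := by
        by_contra hcon
        exact hne' (by rw [List.drop_eq_nil_of_le (by omega)]; rfl)
      have hco2 : s.drop (i+1) = s[i+1]'h2 :: s.drop (i+2) := List.drop_eq_getElem_cons h2
      have hq2 : ((s[i+1]'h2) == '\'' || (s[i+1]'h2) == '"') = false :=
        pvHead_not_quote (Or.inr rfl) hco2 hor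
      conv_rhs => rw [pvLoopA]
      simp only [dif_pos h2, hq2, Bool.false_eq_true, if_false, hbb, Bool.and_true]
      rw [dif_neg hand, dif_pos hor, pvStrip_append_space hsp]
      have e1 := pvFindFrom_lstrip_toNat s i (Nat.le_of_lt h) (by rw [hrest]; exact hne')
      rw [hrest] at e1
      have e2 := pvFindFrom_lstrip_toNat s (i+1) (by omega) hne'
      have hidx : (PySem.Chars.findFrom s (PySem.Chars.lstrip (s.drop (i+1))) (i : Int)).toNat
          = (PySem.Chars.findFrom s (PySem.Chars.lstrip (s.drop (i+1))) ((i+1 : Nat) : Int)).toNat := by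
        rw [e1, e2, hTW]; simp; omega
      rw [hidx]
    · rw [dif_neg hor]

theorem pvMain (s : List Char) : ∀ (k : Nat), ∀ i buf out inq boundary,
    s.length - i ≤ k →
    (inq = none → boundary = pvBufBoundary buf) →
    (∀ q, inq = some q → PySem.Chars.isspace q = false) →
    pvLoopA s i buf out inq = pvLoopB s (PySem.Chars.lower s) i buf out boundary inq := by
  intro k
  induction k with
  | zero =>
    intro i buf out inq boundary hk H1 H2
    have hge : ¬ i < s.length := by omega
    rw [pvLoopA.eq_def, pvLoopB.eq_def]
    simp only [dif_neg hge]
  | succ k ih =>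
    intro i buf out inq boundary hk H1 H2
    by_cases hlt : i < s.length
    case neg =>
      rw [pvLoopA.eq_def, pvLoopB.eq_def]
      simp only [dif_neg hlt]
    case pos =>
    cases inq with
    | some q =>
      have hqs : PySem.Chars.isspace q = false := H2 q rfl
      rw [pvLoopA.eq_def, pvLoopB.eq_def]
      simp only [dif_pos hlt]
      apply ih (i+1) _ _ _ _ (by omega)
      · intro hn
        rw [pvBufBoundary_append]
        by_cases hcq : ((s[i]'hlt) == q) = true
        · rw [beq_iff_eq.mp hcq, hqs]
        · simp [hcq] at hn
      · intro q' hq'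
        by_cases hcq : ((s[i]'hlt) == q) = true
        · simp [hcq] at hq'
        · simp [hcq] at hq'
          rw [← hq']; exact hqs
    | none =>
      have hb := H1 rfl
      by_cases hq : ((s[i]'hlt) == '\'' || (s[i]'hlt) == '"') = true
      · rw [pvLoopA.eq_def, pvLoopB.eq_def]
        simp only [dif_pos hlt, hq, if_true]
        apply ih (i+1) _ _ _ _ (by omega)
        · intro hn; cases hn
        · intro q' hq'
          cases hq'
          simp only [Bool.or_eq_true, beq_iff_eq] at hq
          rcases hq with h1 | h1 <;> rw [h1] <;> decide
      · by_cases hbv : pvBufBoundary buf = true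
        · by_cases hsp : PySem.Chars.isspace (s[i]'hlt) = true
          · -- whitespace with boundary: both sides stutter one character
            rw [hb, hbv, pvStepA_space s i buf out hlt hsp hbv,
              pvStepB_space s i buf out hlt hsp]
            apply ih (i+1) _ _ _ _ (by omega)
            · intro _; rw [pvBufBoundary_append, hsp]
            · intro q' hq'; cases hq'
          · -- non-whitespace: keyword checks coincide position by position
            have hco : s.drop i = s[i]'hlt :: s.drop (i+1) := List.drop_eq_getElem_cons hlt
            have hrest : PySem.Chars.lstrip (s.drop i) = s.drop i := by
              rw [hco]; simp [PySem.Chars.lstrip, Bool.eq_false_iff.mpr hsp]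
            have hTW : (s.drop i).takeWhile PySem.Chars.isspace = [] := by
              rw [hco]; simp [Bool.eq_false_iff.mpr hsp]
            rw [pvLoopA.eq_def, pvLoopB.eq_def]
            simp only [dif_pos hlt, hq, Bool.false_eq_true, if_false, hrest, hb, hbv,
              Bool.and_true, Bool.true_and, pvLower_drop]
            by_cases hand : PySem.Chars.startswith
                (PySem.Chars.lower (s.drop i)) "and ".toList = true
            · rw [dif_pos hand, if_pos hand]
              have e1 := pvFindFrom_lstrip_toNat s i (Nat.le_of_lt hlt)
                (by rw [hrest, hco]; exact List.cons_ne_nil _ _)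
              rw [hrest, hTW] at e1
              rw [e1]
              apply ih (i + 0 + 3) _ _ _ _ (by omega) (fun _ => rfl) (fun q hq' => by cases hq')
            · rw [dif_neg hand, if_neg (by simpa using hand)]
              by_cases hor : PySem.Chars.startswith
                  (PySem.Chars.lower (s.drop i)) "or ".toList = true
              · rw [dif_pos hor, if_pos hor]
                have e1 := pvFindFrom_lstrip_toNat s i (Nat.le_of_lt hlt)
                  (by rw [hrest, hco]; exact List.cons_ne_nil _ _)
                rw [hrest, hTW] at e1
                rw [e1]
                apply ih (i + 0 + 2) _ _ _ _ (by omega) (fun _ => rfl) (fun q hq' => by cases hq')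
              · rw [dif_neg hor, if_neg (by simpa using hor)]
                apply ih (i+1) _ _ _ _ (by omega)
                · intro _; rw [pvBufBoundary_append]
                · intro q' hq'; cases hq'
        · have hbf : pvBufBoundary buf = false := Bool.eq_false_iff.mpr hbv
          rw [hb, hbf]
          rw [pvLoopA.eq_def, pvLoopB.eq_def]
          simp only [dif_pos hlt, hq, Bool.false_eq_true, if_false, hbf, Bool.and_false,
            Bool.false_and]
          apply ih (i+1) _ _ _ _ (by omega)
          · intro _; rw [pvBufBoundary_append]
          · intro q' hq'; cases hq' 

-- ===== VERDICT (by name: the statement is the Claim_ definition above) =====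
theorem tokenise_logical_py_spec : Claim_equal_tokenise_logical_py := by
  intro expr _
  unfold Spec_tokenise_logical_py tokenise_logical_py tokenise_logical_py_alt
  rw [pvMain expr.toList expr.toList.length 0 [] [] none true (by omega)
      (fun _ => rfl) (fun q h => by cases h)]
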